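-- pv_equiv track=rewrite | github.com/JeffersonArteaga/Maquina-Enigma | MaquinaEnigma/MaquinaEnigma.py | config_maquina
-- ===== SOURCE A (Python) =====
-- def config_maquina(lista_keyword,lista_rotores):
--     maquina_configurada = []
--     for rotor in lista_rotores:
--         nueva_config = [None] * len(rotor)
--         for i in range(len(rotor)):
--             nueva_posicion = (i + lista_keyword[lista_rotores.index(rotor)]) %len(rotor)
--             nueva_config[nueva_posicion] = rotor[i]
--         maquina_configurada.append(nueva_config)
--     return maquina_configurada
-- ===== SOURCE B (Python) =====
-- def config_maquina(lista_keyword, lista_rotores):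
--     maquina_configurada = []
--     for rotor in lista_rotores:
--         L = len(rotor)
--         if L == 0:
--             maquina_configurada.append([])
--             continue
--         k = lista_keyword[lista_rotores.index(rotor)] % L
--         maquina_configurada.append(list(rotor[L - k:]) + list(rotor[:L - k]))
--     return maquina_configurada
-- ===== Notes on version B (the rewrite author's own statement) =====
-- stated objective: faster
-- what changed: B replaces A's per-element modular scatter loop (which recomputes lista_rotores.index(rotor) and the keyword lookup on every inner iteration) by recognizing the result as a cyclic rotation and building each configured rotor with one keyword lookup and two slices: rotor[L-k:]+rotor[:L-k] with k = offset % L.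
import Mathlib
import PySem

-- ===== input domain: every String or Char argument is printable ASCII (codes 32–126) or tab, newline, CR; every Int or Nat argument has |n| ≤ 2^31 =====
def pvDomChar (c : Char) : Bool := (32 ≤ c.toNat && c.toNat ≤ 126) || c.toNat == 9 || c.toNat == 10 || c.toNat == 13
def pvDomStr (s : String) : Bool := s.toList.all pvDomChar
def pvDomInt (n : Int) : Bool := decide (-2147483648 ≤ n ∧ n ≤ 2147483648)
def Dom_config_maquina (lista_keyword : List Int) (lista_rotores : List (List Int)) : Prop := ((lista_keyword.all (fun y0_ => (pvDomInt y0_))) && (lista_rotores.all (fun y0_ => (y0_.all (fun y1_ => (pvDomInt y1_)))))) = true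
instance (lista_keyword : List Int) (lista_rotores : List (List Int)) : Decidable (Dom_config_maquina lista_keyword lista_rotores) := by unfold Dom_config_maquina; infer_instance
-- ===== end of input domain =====

-- B replaces A's modular scatter loop by a two-slice cyclic rotation of each rotor (same values, fewer passes).


-- ===== PORT A =====
-- nueva_config = [None]*len(rotor) is a list of Option Int placeholders; inside Pre_ every slot is
-- overwritten (the position map is a bijection), and the final .map (·.getD 0) realizes the List Int value.
def config_maquina (lista_keyword : List Int) (lista_rotores : List (List Int)) : List (List Int) :=
  lista_rotores.foldl (fun maquina_configurada rotor =>
    let nueva_config : List (Option Int) := List.replicate rotor.length none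
    let filled := (PySem.List.pyRange 0 rotor.length 1).foldl (fun cfg i =>
      -- lista_keyword[lista_rotores.index(rotor)] (getD 0: Python raises outside Pre_)
      let off := ((PySem.List.index? lista_rotores rotor).bind
                    (fun j => PySem.List.pyGet? lista_keyword (j : Int))).getD 0
      let nueva_posicion := PySem.Int.mod (i + off) (rotor.length : Int)
      PySem.List.pySetD cfg nueva_posicion (some (PySem.List.pyGetD rotor i 0))) nueva_config
    maquina_configurada ++ [filled.map (fun o => o.getD 0)]) []

-- ===== PORT B =====
def config_maquina_alt (lista_keyword : List Int) (lista_rotores : List (List Int)) : List (List Int) :=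
  lista_rotores.foldl (fun maquina_configurada rotor =>
    if rotor.length = 0 then maquina_configurada ++ [[]]
    else
      let k := PySem.Int.mod (((PySem.List.index? lista_rotores rotor).bind
                  (fun j => PySem.List.pyGet? lista_keyword (j : Int))).getD 0) (rotor.length : Int)
      let cut : Int := (rotor.length : Int) - k
      maquina_configurada ++ [PySem.List.slice rotor (some cut) none ++ PySem.List.slice rotor none (some cut)]) []

-- ===== PRECONDITION & SPEC =====
-- Pre_ excludes exactly the inputs where Python A raises IndexError: a nonempty rotor whose first
-- occurrence index in lista_rotores is not a valid index into lista_keyword.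
def Pre_config_maquina (lista_keyword : List Int) (lista_rotores : List (List Int)) : Prop :=
  ∀ rotor ∈ lista_rotores, rotor = [] ∨ lista_rotores.idxOf rotor < lista_keyword.length
instance (lista_keyword : List Int) (lista_rotores : List (List Int)) : Decidable (Pre_config_maquina lista_keyword lista_rotores) := by unfold Pre_config_maquina; infer_instance
def pvWitness_config_maquina : List Int × List (List Int) := ([3, 1], [[1, 2, 3], [4, 5]])

def Spec_config_maquina (lista_keyword : List Int) (lista_rotores : List (List Int)) (out : List (List Int)) : Prop := out = config_maquina_alt lista_keyword lista_rotores
instance (lista_keyword : List Int) (lista_rotores : List (List Int)) (out : List (List Int)) : Decidable (Spec_config_maquina lista_keyword lista_rotores out) := by unfold Spec_config_maquina; infer_instance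

-- ===== CLAIM (what is proved, stated in full; the proofs are below) =====
def Claim_equal_config_maquina : Prop := ∀ (lista_keyword : List Int) (lista_rotores : List (List Int)), Dom_config_maquina lista_keyword lista_rotores → Pre_config_maquina lista_keyword lista_rotores → Spec_config_maquina lista_keyword lista_rotores (config_maquina lista_keyword lista_rotores)

-- ===== LEMMAS AND PROOFS =====

-- (m+k)%L is the slot A writes rotor[m] to; its inverse map j ↦ (j+L-k)%L
theorem pv_inv1 (L m k : Nat) (hm : m < L) (hk : k < L) : ((m + k) % L + L - k) % L = m := by
  rcases Nat.lt_or_ge (m + k) L with h | h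
  · rw [Nat.mod_eq_of_lt h]
    have e : m + k + L - k = m + L := by omega
    rw [e, Nat.add_mod_right, Nat.mod_eq_of_lt hm]
  · have e1 : (m + k) % L = m + k - L := by
      rw [Nat.mod_eq_sub_mod h, Nat.mod_eq_of_lt (by omega)]
    have e2 : m + k - L + L - k = m := by omega
    rw [e1, e2, Nat.mod_eq_of_lt hm]

theorem pv_inv2 (L j k : Nat) (hj : j < L) (hk : k < L) : ((j + L - k) % L + k) % L = j := by
  rcases Nat.lt_or_ge (j + L - k) L with h | h
  · rw [Nat.mod_eq_of_lt h]
    have e : j + L - k + k = j + L := by omega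
    rw [e, Nat.add_mod_right, Nat.mod_eq_of_lt hj]
  · have e1 : (j + L - k) % L = j - k := by
      rw [Nat.mod_eq_sub_mod h]
      have e : j + L - k - L = j - k := by omega
      rw [e, Nat.mod_eq_of_lt (by omega)]
    have e2 : j - k + k = j := by omega
    rw [e1, e2, Nat.mod_eq_of_lt hj]

theorem pv_idx_iff (L j k m : Nat) (hj : j < L) (hk : k < L) (hm : m < L) :
    j = (m + k) % L ↔ (j + L - k) % L = m := by
  constructor
  · rintro rfl; exact pv_inv1 L m k hm hk
  · intro h; rw [← h]; exact (pv_inv2 L j k hj hk).symm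

theorem pv_scatter_length (r : List Int) (k m : Nat) (cfg : List (Option Int)) :
    ((List.range m).foldl
        (fun cfg i => cfg.set ((i + k) % r.length) (some (r.getD i 0))) cfg).length = cfg.length := by
  induction m generalizing cfg with
  | zero => simp
  | succ m ih =>
    rw [List.range_succ, List.foldl_append]
    simp only [List.foldl_cons, List.foldl_nil, List.length_set]
    exact ih cfg

-- A's scatter fold, characterized elementwise: slot j holds rotor[(j+L-k)%L] once that source index is processed
theorem pv_scatter_get (r : List Int) (k : Nat) (hk : k < r.length) (m : Nat) (hm : m ≤ r.length)
    (j : Nat) (hj : j < r.length) :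
    ((List.range m).foldl
        (fun cfg i => cfg.set ((i + k) % r.length) (some (r.getD i 0)))
        (List.replicate r.length (none : Option Int)))[j]? =
    some (if (j + r.length - k) % r.length < m then some (r.getD ((j + r.length - k) % r.length) 0)
          else none) := by
  induction m with
  | zero => simp [hj]
  | succ m ih =>
    have hmL : m < r.length := by omega
    rw [List.range_succ, List.foldl_append]
    simp only [List.foldl_cons, List.foldl_nil]
    rw [List.getElem?_set]
    have hlen : ((List.range m).foldl
        (fun cfg i => cfg.set ((i + k) % r.length) (some (r.getD i 0)))
        (List.replicate r.length (none : Option Int))).length = r.length := by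
      rw [pv_scatter_length, List.length_replicate]
    by_cases hcase : (m + k) % r.length = j
    · have hj' : (j + r.length - k) % r.length = m := by
        rw [← hcase]; exact pv_inv1 r.length m k hmL hk
      rw [if_pos hcase, if_pos (by rw [hlen]; exact Nat.mod_lt _ (by omega)), hj',
        if_pos (Nat.lt_succ_self m)]
    · rw [if_neg hcase, ih (by omega)]
      have hne : (j + r.length - k) % r.length ≠ m := by
        intro h
        exact hcase (((pv_idx_iff r.length j k m hj hk hmL).mpr h).symm)
      by_cases hlt : (j + r.length - k) % r.length < m
      · rw [if_pos hlt, if_pos (by omega)]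
      · rw [if_neg hlt, if_neg (by omega)]

-- B's two-slice rotation, characterized elementwise by the same formula
theorem pv_rot_get (r : List Int) (k : Nat) (hk : k < r.length) (j : Nat) (hj : j < r.length) :
    (r.drop (r.length - k) ++ r.take (r.length - k))[j]? =
    some (r.getD ((j + r.length - k) % r.length) 0) := by
  have hdl : (r.drop (r.length - k)).length = k := by
    rw [List.length_drop]; omega
  rw [List.getElem?_append, hdl]
  by_cases hjk : j < k
  · rw [if_pos hjk, List.getElem?_drop]
    have hidx : (j + r.length - k) % r.length = r.length - k + j := by
      rw [Nat.mod_eq_of_lt (by omega)]; omega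
    rw [hidx, List.getD_eq_getElem?_getD, List.getElem?_eq_getElem (by omega)]
    simp
  · rw [if_neg hjk, List.getElem?_take, if_pos (by omega)]
    have hidx : (j + r.length - k) % r.length = j - k := by
      rw [Nat.mod_eq_sub_mod (by omega)]
      have e : j + r.length - k - r.length = j - k := by omega
      rw [e, Nat.mod_eq_of_lt (by omega)]
    rw [hidx, List.getD_eq_getElem?_getD, List.getElem?_eq_getElem (by omega)]
    simp

-- per-rotor equality of the two bodies, for any offset value
theorem pv_rotor_eq (rotor : List Int) (off : Int) :
    ((PySem.List.pyRange 0 (rotor.length : Int) 1).foldl (fun cfg i =>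
        PySem.List.pySetD cfg (PySem.Int.mod (i + off) (rotor.length : Int))
          (some (PySem.List.pyGetD rotor i 0)))
      (List.replicate rotor.length (none : Option Int))).map (fun o => o.getD 0) =
    if rotor.length = 0 then []
    else PySem.List.slice rotor (some ((rotor.length : Int) - PySem.Int.mod off (rotor.length : Int))) none ++
         PySem.List.slice rotor none (some ((rotor.length : Int) - PySem.Int.mod off (rotor.length : Int))) := by
  by_cases h0 : rotor.length = 0
  · rw [if_pos h0, h0]
    simp
  · rw [if_neg h0]
    have hLpos : 0 < rotor.length := Nat.pos_of_ne_zero h0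
    have hL : (0 : Int) < (rotor.length : Int) := by exact_mod_cast hLpos
    have hmnn := PySem.Int.mod_nonneg off hL
    have hmlt := PySem.Int.mod_lt off hL
    have hoff : PySem.Int.mod off (rotor.length : Int) = (((PySem.Int.mod off (rotor.length : Int)).toNat : Nat) : Int) :=
      (Int.toNat_of_nonneg hmnn).symm
    have hk : (PySem.Int.mod off (rotor.length : Int)).toNat < rotor.length := by omega
    have hcut : (rotor.length : Int) - PySem.Int.mod off (rotor.length : Int) =
        ((rotor.length - (PySem.Int.mod off (rotor.length : Int)).toNat : Nat) : Int) := by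
      omega
    rw [hcut, PySem.List.slice_from rotor (by positivity), PySem.List.slice_to rotor (by positivity),
      Int.toNat_natCast]
    rw [PySem.List.pyRange_one, List.foldl_map]
    have hfold :
        (List.range ((rotor.length : Int) - 0).toNat).foldl
          (fun (cfg : List (Option Int)) (x : Nat) =>
            PySem.List.pySetD cfg (PySem.Int.mod ((0 : Int) + (x : Int) + off) (rotor.length : Int))
              (some (PySem.List.pyGetD rotor ((0 : Int) + (x : Int)) 0)))
          (List.replicate rotor.length (none : Option Int)) =
        (List.range rotor.length).foldl
          (fun cfg i => cfg.set ((i + (PySem.Int.mod off (rotor.length : Int)).toNat) % rotor.length)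
            (some (rotor.getD i 0)))
          (List.replicate rotor.length (none : Option Int)) := by
      have hrn : ((rotor.length : Int) - 0).toNat = rotor.length := by omega
      rw [hrn]
      apply PySem.List.foldl_congr_mem
      intro acc x hx
      have hxL : x < rotor.length := List.mem_range.mp hx
      have hmod : PySem.Int.mod ((0 : Int) + (x : Int) + off) (rotor.length : Int) =
          (((x + (PySem.Int.mod off (rotor.length : Int)).toNat) % rotor.length : Nat) : Int) := by
        rw [PySem.Int.mod_eq_emod_of_pos hL, zero_add]
        have h2 : off % (rotor.length : Int) = ((PySem.Int.mod off (rotor.length : Int)).toNat : Int) := by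
          rw [← PySem.Int.mod_eq_emod_of_pos hL]; exact hoff
        obtain ⟨t, ht⟩ : ((rotor.length : Int)) ∣
            (off - ((PySem.Int.mod off (rotor.length : Int)).toNat : Int)) := by
          refine ⟨off / (rotor.length : Int), ?_⟩
          rw [← h2, Int.emod_def]; ring
        have hx2 : ((x : Int) + off) =
            ((x : Int) + ((PySem.Int.mod off (rotor.length : Int)).toNat : Int)) +
              (rotor.length : Int) * t := by
          rw [← ht]; ring
        rw [hx2, Int.add_mul_emod_self_left]
        push_cast
        rfl
      rw [hmod, PySem.List.pySetD_natCast, zero_add, PySem.List.pyGetD_natCast]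
    rw [hfold]
    apply List.ext_getElem?
    intro j
    by_cases hj : j < rotor.length
    · rw [List.getElem?_map,
        pv_scatter_get rotor ((PySem.Int.mod off (rotor.length : Int)).toNat) hk rotor.length le_rfl j hj,
        if_pos (Nat.mod_lt _ (by omega)),
        pv_rot_get rotor ((PySem.Int.mod off (rotor.length : Int)).toNat) hk j hj]
      rfl
    · have h1 : ((List.range rotor.length).foldl
          (fun cfg i => cfg.set ((i + (PySem.Int.mod off (rotor.length : Int)).toNat) % rotor.length)
            (some (rotor.getD i 0)))
          (List.replicate rotor.length (none : Option Int))).length = rotor.length := by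
        rw [pv_scatter_length, List.length_replicate]
      rw [List.getElem?_map, List.getElem?_eq_none (by rw [h1]; omega),
        List.getElem?_eq_none (by
          simp only [List.length_append, List.length_drop, List.length_take]
          omega)]
      rfl

-- ===== VERDICT (by name: the statement is the Claim_ definition above) =====
theorem config_maquina_spec : Claim_equal_config_maquina := by
  intro lista_keyword lista_rotores _ _
  unfold Spec_config_maquina config_maquina config_maquina_alt
  apply PySem.List.foldl_congr_mem
  intro acc rotor _
  dsimp only
  by_cases h0 : rotor.length = 0
  · rw [if_pos h0]
    rw [pv_rotor_eq rotor (((PySem.List.index? lista_rotores rotor).bind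
        (fun j => PySem.List.pyGet? lista_keyword (j : Int))).getD 0), if_pos h0]
  · rw [if_neg h0]
    rw [pv_rotor_eq rotor (((PySem.List.index? lista_rotores rotor).bind
        (fun j => PySem.List.pyGet? lista_keyword (j : Int))).getD 0), if_neg h0]
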